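-- pv_equiv track=rewrite | github.com/RKobyshev/INF | 1-2weeks/N3_4.py | tr
-- ===== SOURCE A (Python) =====
-- def ap(s, a):
--     for i in range(len(a)):
--         a[i] = s+ a[i]
--     return a
--
-- def tr(size, s):
--     res = []
--     if size == 1:
--         res.append(s)
--     else:
--         res.append(s)
--         for i in ap(s, tr(size - 2, s)):
--             res.append(i)
--         res.append(s)
--     return res
-- ===== SOURCE B (Python) =====
-- def tr(size, s):
--     half = []
--     cur = ""
--     for _ in range((size + 1) // 2):
--         cur += s
--         half.append(cur)
--     return half + list(reversed(half[:-1]))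
-- ===== Notes on version B (the rewrite author's own statement) =====
-- stated objective: alternative
-- what changed: Replaces A's recursion (which re-prefixes s onto every element of the recursive result at each level) by a single loop that builds each repeated-string prefix once and mirrors the first half.
-- outside the precondition, e.g. on tr(2, 'a'): A raises RecursionError, B returns ['a']; on tr(0, 'a'): A raises RecursionError, B returns []
import Mathlib
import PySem

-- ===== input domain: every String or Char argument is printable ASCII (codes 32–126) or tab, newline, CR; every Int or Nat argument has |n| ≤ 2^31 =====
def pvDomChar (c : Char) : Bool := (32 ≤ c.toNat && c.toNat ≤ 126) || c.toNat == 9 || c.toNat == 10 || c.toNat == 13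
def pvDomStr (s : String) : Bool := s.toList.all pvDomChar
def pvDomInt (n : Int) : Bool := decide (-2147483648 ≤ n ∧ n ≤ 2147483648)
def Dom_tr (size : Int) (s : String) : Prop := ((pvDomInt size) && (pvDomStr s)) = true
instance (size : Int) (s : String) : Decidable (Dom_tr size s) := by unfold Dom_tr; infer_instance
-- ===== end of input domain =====

-- B builds each repeated-string prefix once in one loop and mirrors the first half,
-- instead of A's recursion that re-prefixes s onto every recursive element (alternative).

-- ===== PORT A =====
-- a[i] = s + a[i] for each index: the in-place prefixing loop is a map over the list
def ap (s : String) (a : List String) : List String :=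
  a.map (fun x => s ++ x)

-- A recurses on size - 2 and terminates only for odd positive size; the fuel
-- only makes the same recursion structurally total (Pre_tr guarantees enough fuel).
def trFuel (s : String) : Nat → Int → List String
  | 0, _ => []
  | fuel + 1, size =>
    if size = 1 then [s]
    else [s] ++ ap s (trFuel s fuel (size - 2)) ++ [s]

def tr (size : Int) (s : String) : List String :=
  trFuel s (size.toNat + 1) size

-- ===== PORT B =====
def tr_alt (size : Int) (s : String) : List String :=
  let p := (PySem.List.pyRange 0 (PySem.Int.floordiv (size + 1) 2) 1).foldl
    (fun (p : String × List String) _ => (p.1 ++ s, p.2 ++ [p.1 ++ s])) ("", [])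
  p.2 ++ (PySem.List.slice p.2 none (some (-1))).reverse

-- ===== PRECONDITION & SPEC =====
-- A's recursion on size-2 never reaches the base case size == 1 for even or
-- non-positive size and raises RecursionError there; Pre_ admits exactly the
-- inputs on which the Python A returns.
def Pre_tr (size : Int) (s : String) : Prop := 1 ≤ size ∧ size % 2 = 1
instance (size : Int) (s : String) : Decidable (Pre_tr size s) := by unfold Pre_tr; infer_instance
def pvWitness_tr : Int × String := (5, "ab")

def Spec_tr (size : Int) (s : String) (out : List String) : Prop := out = tr_alt size s
instance (size : Int) (s : String) (out : List String) : Decidable (Spec_tr size s out) := by unfold Spec_tr; infer_instance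

-- ===== CLAIM (what is proved, stated in full; the proofs are below) =====
def Claim_equal_tr : Prop := ∀ (size : Int) (s : String), Dom_tr size s → Pre_tr size s → Spec_tr size s (tr size s)

-- ===== LEMMAS AND PROOFS =====

-- s repeated k times, built by appending s on the right (B's accumulator)
def rep (s : String) : Nat → String
  | 0 => ""
  | k + 1 => rep s k ++ s

-- the first half: [s*1, s*2, …, s*m]
def up (s : String) (m : Nat) : List String :=
  (List.range m).map (fun k => rep s (k + 1))

lemma rep_one (s : String) : rep s 1 = s := by
  show "" ++ s = s
  simp

lemma append_rep (s : String) (k : Nat) : s ++ rep s k = rep s (k + 1) := by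
  induction k with
  | zero => simp [rep]
  | succ k ih =>
    show s ++ (rep s k ++ s) = rep s (k + 1) ++ s
    rw [← String.append_assoc, ih]

lemma up_succ (s : String) (m : Nat) :
    up s (m + 1) = up s m ++ [rep s (m + 1)] := by
  simp [up, List.range_succ]

lemma map_up (s : String) (m : Nat) :
    ap s (up s m) = (List.range m).map (fun k => rep s (k + 2)) := by
  simp only [ap, up, List.map_map]
  exact List.map_congr_left (fun k _ => append_rep s (k + 1))

lemma cons_map_up (s : String) (m : Nat) :
    [s] ++ ap s (up s m) = up s (m + 1) := by
  rw [map_up]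
  simp only [up, List.range_succ_eq_map, List.map_cons, List.map_map]
  rw [← rep_one s]
  rfl

lemma trFuel_odd (s : String) (n fuel : Nat) (h : n + 1 ≤ fuel) :
    trFuel s fuel (2 * (n : Int) + 1) = up s (n + 1) ++ (up s n).reverse := by
  induction n generalizing fuel with
  | zero =>
    obtain ⟨m, rfl⟩ : ∃ m, fuel = m + 1 := ⟨fuel - 1, by omega⟩
    simp [trFuel, up, rep_one]
  | succ n ih =>
    obtain ⟨m, rfl⟩ : ∃ m, fuel = m + 1 := ⟨fuel - 1, by omega⟩
    have hne : (2 * ((n : Int) + 1) + 1) ≠ 1 := by omega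
    have harg : 2 * ((n : Int) + 1) + 1 - 2 = 2 * (n : Int) + 1 := by ring
    push_cast [trFuel, hne, harg]
    rw [ih m (by omega)]
    rw [show ap s (up s (n+1) ++ (up s n).reverse)
        = ap s (up s (n+1)) ++ (ap s (up s n)).reverse by
      simp [ap, List.map_append]]
    rw [← cons_map_up s (n + 1), ← cons_map_up s n]
    simp [List.append_assoc]

lemma tr_alt_odd (s : String) (n : Nat) :
    tr_alt (2 * (n : Int) + 1) s = up s (n + 1) ++ (up s n).reverse := by
  have hm : PySem.Int.floordiv (2 * (n : Int) + 1 + 1) 2 = ((n : Int) + 1) := by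
    have : 2 * (n : Int) + 1 + 1 = ((2 * n + 2 : Nat) : Int) := by push_cast; ring
    rw [this, show (2 : Int) = ((2 : Nat) : Int) from rfl, PySem.Int.floordiv_natCast]
    omega
  have hfold : ∀ (m : Nat),
      (PySem.List.pyRange 0 (m : Int) 1).foldl
        (fun (p : String × List String) _ => (p.1 ++ s, p.2 ++ [p.1 ++ s])) ("", [])
      = (rep s m, up s m) := by
    intro m
    induction m with
    | zero => simp [PySem.List.pyRange_one_eq_nil, up, rep]
    | succ m ih =>
      push_cast
      rw [PySem.List.pyRange_one_succ_right (by positivity), List.foldl_append]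
      push_cast at ih
      rw [ih]
      simp [rep, up_succ]
  unfold tr_alt
  rw [hm, show (n : Int) + 1 = ((n + 1 : Nat) : Int) by push_cast; ring, hfold (n + 1)]
  show up s (n + 1) ++ (PySem.List.slice (up s (n + 1)) none (some (-1))).reverse = _
  rw [PySem.List.slice_to_neg_one, up_succ, List.dropLast_concat]

-- ===== VERDICT (by name: the statement is the Claim_ definition above) =====
theorem tr_spec : Claim_equal_tr := by
  intro size s _ hpre
  obtain ⟨h1, h2⟩ := hpre
  obtain ⟨n, rfl⟩ : ∃ n : Nat, size = 2 * (n : Int) + 1 := by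
    refine ⟨((size - 1) / 2).toNat, ?_⟩
    omega
  show tr _ s = tr_alt _ s
  rw [tr_alt_odd]
  unfold tr
  apply trFuel_odd
  omega
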